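-- pv_equiv track=rewrite | github.com/paiml/depyler | examples/hard_final_lang_pda.py | pda_anbn
-- ===== SOURCE A (Python) =====
-- def pda_create_stack() -> list[int]:
--     """Create PDA stack with bottom marker (0)."""
--     return [0]
--
-- def pda_push(stack: list[int], symbol: int) -> int:
--     """Push symbol onto stack. Returns new size."""
--     stack.append(symbol)
--     return len(stack)
--
-- def pda_pop(stack: list[int]) -> int:
--     """Pop symbol from stack. Returns popped symbol or -1 if empty."""
--     if len(stack) == 0:
--         return 0 - 1
--     val: int = stack[len(stack) - 1]
--     stack.pop()
--     return val
--
-- def pda_top(stack: list[int]) -> int: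
--     """Peek at top of stack. Returns -1 if empty."""
--     if len(stack) == 0:
--         return 0 - 1
--     return stack[len(stack) - 1]
--
-- def pda_anbn(input_str: list[int]) -> int:
--     """Recognize language a^n b^n. 1=a, 2=b. Returns 1 if valid."""
--     stack: list[int] = pda_create_stack()
--     state: int = 0
--     i: int = 0
--     while i < len(input_str):
--         sym: int = input_str[i]
--         if state == 0:
--             if sym == 1:
--                 pda_push(stack, 1)
--             if sym == 2:
--                 top: int = pda_top(stack)
--                 if top != 1:
--                     return 0
--                 pda_pop(stack)
--                 state = 1
--         else:
--             if sym == 1: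
--                 return 0
--             if sym == 2:
--                 top2: int = pda_top(stack)
--                 if top2 != 1:
--                     return 0
--                 pda_pop(stack)
--         i = i + 1
--     if len(stack) == 1:
--         return 1
--     return 0
-- ===== SOURCE B (Python) =====
-- def pda_anbn(input_str: list[int]) -> int:
--     """Recognize a^n b^n (1=a, 2=b; other symbols ignored) by
--     filter + prefix-count + suffix-check instead of PDA simulation."""
--     filtered = [s for s in input_str if s == 1 or s == 2]
--     k = 0
--     while k < len(filtered) and filtered[k] == 1:
--         k += 1
--     if len(filtered) == 2 * k and all(s == 2 for s in filtered[k:]):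
--         return 1
--     return 0
-- ===== Notes on version B (the rewrite author's own statement) =====
-- stated objective: faster
-- what changed: Replaced the per-symbol PDA state/stack simulation with a filter-to-{1,2}, count-leading-ones, then length-and-suffix check (accept iff filtered = 1^k 2^k).
import Mathlib
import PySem

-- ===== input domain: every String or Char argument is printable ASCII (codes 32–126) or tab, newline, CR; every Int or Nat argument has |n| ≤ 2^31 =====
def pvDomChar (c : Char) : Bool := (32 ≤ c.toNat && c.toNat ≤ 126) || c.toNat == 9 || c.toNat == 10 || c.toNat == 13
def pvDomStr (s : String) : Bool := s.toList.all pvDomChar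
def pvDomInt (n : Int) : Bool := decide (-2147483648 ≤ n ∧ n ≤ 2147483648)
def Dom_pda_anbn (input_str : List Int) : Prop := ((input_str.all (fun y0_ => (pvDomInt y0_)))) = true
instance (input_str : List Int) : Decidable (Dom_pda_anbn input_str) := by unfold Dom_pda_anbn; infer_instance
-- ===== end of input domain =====

-- B recognizes a^n b^n by filter + prefix-count + suffix-check instead of simulating the PDA (simpler).

-- ===== PORT A =====
-- Python's helpers mutate the stack; here push/pop return the new stack alongside
-- the value the Python helper returns (size / popped symbol).
def pda_create_stack : List Int := [0]

def pda_push (stack : List Int) (symbol : Int) : Int × List Int :=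
  let s := stack ++ [symbol]
  ((s.length : Int), s)

def pda_pop (stack : List Int) : Int × List Int :=
  if stack.length = 0 then (0 - 1, stack)
  else (stack.getLastD 0, stack.dropLast)

def pda_top (stack : List Int) : Int :=
  if stack.length = 0 then 0 - 1 else stack.getLastD 0

-- the while-loop of pda_anbn, recursing on the remaining input
def pda_loop : List Int → List Int → Int → Int
  | [], stack, _ => if stack.length = 1 then 1 else 0
  | sym :: rest, stack, state =>
    if state = 0 then
      -- Python executes `if sym == 1` and `if sym == 2` in sequence
      let stack1 := if sym = 1 then (pda_push stack 1).2 else stack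
      if sym = 2 then
        if pda_top stack1 ≠ 1 then 0
        else pda_loop rest (pda_pop stack1).2 1
      else pda_loop rest stack1 0
    else
      if sym = 1 then 0
      else if sym = 2 then
        if pda_top stack ≠ 1 then 0
        else pda_loop rest (pda_pop stack).2 state
      else pda_loop rest stack state

def pda_anbn (input_str : List Int) : Int :=
  pda_loop input_str pda_create_stack 0

-- ===== PORT B =====
def pda_anbn_alt (input_str : List Int) : Int :=
  let filtered := input_str.filter (fun s => s == 1 || s == 2)
  let k := (filtered.takeWhile (fun s => s == 1)).length
  if filtered.length = 2 * k ∧ (filtered.drop k).all (fun s => s == 2) then 1 else 0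

-- ===== PRECONDITION & SPEC =====
def Spec_pda_anbn (input_str : List Int) (out : Int) : Prop := out = pda_anbn_alt input_str
instance (input_str : List Int) (out : Int) : Decidable (Spec_pda_anbn input_str out) := by unfold Spec_pda_anbn; infer_instance

-- ===== CLAIM (what is proved, stated in full; the proofs are below) =====
def Claim_equal_pda_anbn : Prop := ∀ (input_str : List Int), Dom_pda_anbn input_str → Spec_pda_anbn input_str (pda_anbn input_str)

-- ===== LEMMAS AND PROOFS =====

-- abstract acceptance check: st = 0 while still reading a's, st ≠ 0 after the first b;
-- m = number of 1's currently on the stack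
def chk (st : Nat) (m : Nat) : List Int → Bool
  | [] => m == 0
  | s :: r =>
    if s = 1 then (if st = 0 then chk 0 (m + 1) r else false)
    else if s = 2 then (decide (m ≠ 0) && chk 1 (m - 1) r)
    else chk st m r

theorem pda_loop_chk (rest : List Int) : ∀ (m : Nat) (st : Int),
    pda_loop rest ((0 : Int) :: List.replicate m (1 : Int)) st
      = if chk (if st = 0 then 0 else 1) m rest then 1 else 0 := by
  induction rest with
  | nil =>
    intro m st
    cases m <;> simp [pda_loop, chk]
  | cons sym rest ih =>
    intro m st
    by_cases hst : st = 0
    · subst hst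
      by_cases h1 : sym = 1
      · subst h1
        have hpush : (pda_push ((0 : Int) :: List.replicate m 1) 1).2
            = (0 : Int) :: List.replicate (m + 1) 1 := by
          simp [pda_push, List.replicate_succ']
        simp only [pda_loop, chk]
        norm_num
        rw [hpush]
        simpa using ih (m + 1) 0
      · by_cases h2 : sym = 2
        · subst h2
          cases m with
          | zero => simp [pda_loop, chk, pda_top, h1]
          | succ m' =>
            simp only [pda_loop, chk]
            have htop : pda_top ((0 : Int) :: List.replicate (m' + 1) 1) = 1 := by
              simp [pda_top, List.getLastD, List.replicate_succ']
            have hpop : (pda_pop ((0 : Int) :: List.replicate (m' + 1) 1)).2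
                = (0 : Int) :: List.replicate m' 1 := by
              simp only [pda_pop, List.replicate_succ']
              rw [if_neg (by simp)]
              rw [← List.cons_append, List.dropLast_concat]
            simp only [h1]
            norm_num [htop, hpop]
            simpa using ih m' 1
        · simp only [pda_loop, chk, if_neg h1, if_neg h2]
          simpa using ih m 0
    · by_cases h1 : sym = 1
      · subst h1; simp [pda_loop, chk, hst]
      · by_cases h2 : sym = 2
        · subst h2
          cases m with
          | zero => simp [pda_loop, chk, pda_top, hst, h1]
          | succ m' =>
            simp only [pda_loop, chk, if_neg hst]
            have htop : pda_top ((0 : Int) :: List.replicate (m' + 1) 1) = 1 := by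
              simp [pda_top, List.getLastD, List.replicate_succ']
            have hpop : (pda_pop ((0 : Int) :: List.replicate (m' + 1) 1)).2
                = (0 : Int) :: List.replicate m' 1 := by
              simp only [pda_pop, List.replicate_succ']
              rw [if_neg (by simp)]
              rw [← List.cons_append, List.dropLast_concat]
            simp only [h1]
            norm_num [htop, hpop, h1, hst]
            simpa [hst] using ih m' st
        · simp only [pda_loop, chk, if_neg hst, if_neg h1, if_neg h2]
          simpa [hst] using ih m st

-- chk ignores symbols other than 1 and 2
theorem chk_filter (l : List Int) : ∀ (st m : Nat),
    chk st m l = chk st m (l.filter (fun s => s == 1 || s == 2)) := by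
  induction l with
  | nil => intro st m; rfl
  | cons s r ih =>
    intro st m
    by_cases h1 : s = 1
    · subst h1; simp [chk, ih]
    · by_cases h2 : s = 2
      · subst h2; simp [chk, ih]
      · simp [chk, h1, h2, ih]

-- after the first b, chk accepts exactly the all-2 list of the right length
theorem chk1_replicate (g : List Int) (hg : ∀ s ∈ g, s = 1 ∨ s = 2) : ∀ (n : Nat),
    chk 1 n g = decide (g = List.replicate n (2 : Int)) := by
  induction g with
  | nil =>
    intro n; cases n <;> simp [chk]
  | cons s r ih =>
    intro n
    have hs := hg s (List.mem_cons_self ..)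
    have hr : ∀ x ∈ r, x = 1 ∨ x = 2 := fun x hx => hg x (List.mem_cons_of_mem _ hx)
    rcases hs with h1 | h2
    · subst h1
      cases n with
      | zero => simp [chk]
      | succ n' => simp [chk, List.replicate_succ]
    · subst h2
      cases n with
      | zero => simp [chk]
      | succ n' => simp [chk, List.replicate_succ, ih hr]

-- consuming the leading 1's: chk in state 0 reduces to chk in state 1 on the suffix
theorem chk0_split (f : List Int) (hf : ∀ s ∈ f, s = 1 ∨ s = 2) : ∀ (m : Nat),
    chk 0 m f = chk 1 (m + (f.takeWhile (fun s => s == 1)).length)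
                      (f.drop (f.takeWhile (fun s => s == 1)).length) := by
  induction f with
  | nil => intro m; rfl
  | cons s r ih =>
    intro m
    have hs := hf s (List.mem_cons_self ..)
    have hr : ∀ x ∈ r, x = 1 ∨ x = 2 := fun x hx => hf x (List.mem_cons_of_mem _ hx)
    rcases hs with h1 | h2
    · subst h1
      simp only [chk, List.takeWhile]
      norm_num
      rw [ih hr (m + 1)]
      congr 1
      omega
    · subst h2
      simp [chk, List.takeWhile]

theorem pda_anbn_eq_alt (input_str : List Int) :
    pda_anbn input_str = pda_anbn_alt input_str := by
  set f := input_str.filter (fun s => s == 1 || s == 2) with hf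
  have hmem : ∀ s ∈ f, s = 1 ∨ s = 2 := by
    intro s hs
    have := List.of_mem_filter hs
    simp only [Bool.or_eq_true, beq_iff_eq] at this
    exact this
  set k := (f.takeWhile (fun s => s == 1)).length with hk
  have hkle : k ≤ f.length := by
    exact (List.takeWhile_prefix _).length_le
  have hmem' : ∀ s ∈ f.drop k, s = 1 ∨ s = 2 := fun s hs => hmem s (List.mem_of_mem_drop hs)
  have hchain : pda_anbn input_str = if chk 1 k (f.drop k) then 1 else 0 := by
    have h0 := pda_loop_chk input_str 0 0
    norm_num [List.replicate_zero] at h0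
    simp only [pda_anbn, pda_create_stack]
    rw [h0, chk_filter, ← hf, chk0_split f hmem 0]
    simp [hk]
  rw [hchain, chk1_replicate _ hmem' k]
  have hrep : (f.drop k = List.replicate k (2 : Int))
      ↔ (f.length = 2 * k ∧ (f.drop k).all (fun s => s == 2) = true) := by
    rw [List.eq_replicate_iff]
    constructor
    · rintro ⟨hl, hall⟩
      constructor
      · have := List.length_drop (l := f) (i := k); omega
      · simp only [List.all_eq_true, beq_iff_eq]; exact hall
    · rintro ⟨hl, hall⟩
      constructor
      · have := List.length_drop (l := f) (i := k); omega
      · simpa only [List.all_eq_true, beq_iff_eq] using hall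
  simp only [pda_anbn_alt, ← hf, ← hk]
  by_cases h : f.drop k = List.replicate k (2 : Int)
  · rw [if_pos (by simpa using h), if_pos (hrep.mp h)]
  · rw [if_neg (by simpa using h), if_neg (fun hc => h (hrep.mpr hc))]

-- ===== VERDICT (by name: the statement is the Claim_ definition above) =====
theorem pda_anbn_spec : Claim_equal_pda_anbn := by
  intro input_str _
  unfold Spec_pda_anbn
  exact pda_anbn_eq_alt input_str
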